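-- pv_equiv track=rewrite | github.com/zero-day-labs/riscv-aia | test/integration/aia_tb.py | organize_topi
-- ===== SOURCE A (Python) =====
-- def organize_topi(array, nr_idcs = 0, nr_domains = 0, length=25):
--     index = 0
--     organized_data = []
--     final_result = []
--
--     if (nr_idcs == 0 or nr_domains == 0):
--         raise("NR_IMSIC or NR_INTP_FILES lower than 1")
--
--     for i in range(nr_idcs):
--         for j in range(nr_domains):
--             subrange = array[index:index + length]
--             index = index + length + 1
--             organized_data.append(subrange)
--         organized_data.reverse()
--         final_result.append(organized_data)
--         organized_data = []
--
--     final_result.reverse()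
--     return final_result
-- ===== SOURCE B (Python) =====
-- def organize_topi(array, nr_idcs = 0, nr_domains = 0, length=25):
--     if (nr_idcs == 0 or nr_domains == 0):
--         raise("NR_IMSIC or NR_INTP_FILES lower than 1")
--
--     # balanced divide and conquer: produce k slices starting at 'start' (later slices
--     # first) plus the position after them; the two halves are concatenated in swapped
--     # order, which realizes the reversed orderings without any reverse() call
--     def rows(start, k):
--         if k <= 0:
--             return [], start
--         if k == 1:
--             return [array[start:start + length]], start + length + 1
--         h = k // 2
--         first, nxt = rows(start, h)
--         second, end = rows(nxt, k - h)
--         second.extend(first)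
--         return second, end
--
--     def blocks(start, n):
--         if n <= 0:
--             return [], start
--         if n == 1:
--             row, nxt = rows(start, nr_domains)
--             return [row], nxt
--         h = n // 2
--         first, nxt = blocks(start, h)
--         second, end = blocks(nxt, n - h)
--         second.extend(first)
--         return second, end
--
--     return blocks(0, nr_idcs)[0]
-- ===== Notes on version B (the rewrite author's own statement) =====
-- stated objective: alternative
-- what changed: Replaces A's linear accumulator loop (running index, append, two in-place reverse() calls) by a balanced divide-and-conquer on the slice counts that threads the start position through the recursion and concatenates the two recursive halves in swapped order, realizing both reversals with no loop, no mutation of an accumulator across iterations and no reverse().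
import Mathlib
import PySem

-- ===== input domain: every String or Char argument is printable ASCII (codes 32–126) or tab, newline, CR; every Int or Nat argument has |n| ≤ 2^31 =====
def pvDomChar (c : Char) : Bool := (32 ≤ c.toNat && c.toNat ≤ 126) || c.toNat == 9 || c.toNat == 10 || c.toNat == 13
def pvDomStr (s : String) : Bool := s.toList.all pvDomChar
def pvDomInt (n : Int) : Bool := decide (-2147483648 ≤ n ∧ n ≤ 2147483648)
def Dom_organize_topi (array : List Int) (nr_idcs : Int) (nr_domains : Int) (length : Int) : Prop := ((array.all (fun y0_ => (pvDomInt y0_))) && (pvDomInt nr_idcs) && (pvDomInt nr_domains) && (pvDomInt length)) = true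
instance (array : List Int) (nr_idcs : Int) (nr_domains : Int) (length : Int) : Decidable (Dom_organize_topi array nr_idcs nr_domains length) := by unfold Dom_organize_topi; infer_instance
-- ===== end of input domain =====

-- B replaces A's linear accumulator loop (append + two in-place reverse()) by a balanced
-- divide-and-conquer on the slice counts, threading the start position and concatenating
-- halves in swapped order to realize both reversals; objective: alternative (not faster).


-- ===== PORT A =====
def organize_topi (array : List Int) (nr_idcs : Int) (nr_domains : Int) (length : Int) : List (List (List Int)) :=
  -- the guard 'if nr_idcs == 0 or nr_domains == 0: raise(...)' raises (TypeError); excluded by Pre_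
  let st :=
    (PySem.List.pyRange 0 nr_idcs 1).foldl
      (fun (st : Int × List (List (List Int))) (_i : Int) =>
        let inner :=
          (PySem.List.pyRange 0 nr_domains 1).foldl
            (fun (st2 : Int × List (List Int)) (_j : Int) =>
              (st2.1 + length + 1,
               st2.2 ++ [PySem.List.slice array (some st2.1) (some (st2.1 + length))]))
            (st.1, [])
        (inner.1, st.2 ++ [inner.2.reverse]))
      ((0 : Int), ([] : List (List (List Int))))
  st.2.reverse

-- ===== PORT B =====
-- rows start k: balanced divide and conquer — k slices starting at 'start' (later slices
-- first) and the position after them; halves concatenated in swapped order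
def otB_rows (array : List Int) (length : Int) (start : Int) (k : Int) :
    List (List Int) × Int :=
  if k ≤ 0 then ([], start)
  else if k = 1 then
    ([PySem.List.slice array (some start) (some (start + length))], start + length + 1)
  else
    let h := PySem.Int.floordiv k 2
    let f := otB_rows array length start h
    let s := otB_rows array length f.2 (k - h)
    (s.1 ++ f.1, s.2)
  termination_by k.toNat
  decreasing_by
  · have := PySem.Int.floordiv_eq_ediv_of_pos (a := k) (b := 2) (by omega)
    omega
  · have := PySem.Int.floordiv_eq_ediv_of_pos (a := k) (b := 2) (by omega)
    omega

-- blocks start n: the same divide and conquer over the n rows, threading the position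
def otB_blocks (array : List Int) (length : Int) (nr_domains : Int) (start : Int)
    (n : Int) : List (List (List Int)) × Int :=
  if n ≤ 0 then ([], start)
  else if n = 1 then
    let r := otB_rows array length start nr_domains
    ([r.1], r.2)
  else
    let h := PySem.Int.floordiv n 2
    let f := otB_blocks array length nr_domains start h
    let s := otB_blocks array length nr_domains f.2 (n - h)
    (s.1 ++ f.1, s.2)
  termination_by n.toNat
  decreasing_by
  · have := PySem.Int.floordiv_eq_ediv_of_pos (a := n) (b := 2) (by omega)
    omega
  · have := PySem.Int.floordiv_eq_ediv_of_pos (a := n) (b := 2) (by omega)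
    omega

def organize_topi_alt (array : List Int) (nr_idcs : Int) (nr_domains : Int) (length : Int) : List (List (List Int)) :=
  -- same guard as A (raises when nr_idcs == 0 or nr_domains == 0); excluded by Pre_
  (otB_blocks array length nr_domains 0 nr_idcs).1

-- ===== PRECONDITION & SPEC =====
-- Pre_ excludes exactly nr_idcs == 0 or nr_domains == 0, where both A and B raise (TypeError,
-- from 'raise' applied to a str).
def Pre_organize_topi (array : List Int) (nr_idcs : Int) (nr_domains : Int) (length : Int) : Prop :=
  nr_idcs ≠ 0 ∧ nr_domains ≠ 0
instance (array : List Int) (nr_idcs : Int) (nr_domains : Int) (length : Int) : Decidable (Pre_organize_topi array nr_idcs nr_domains length) := by unfold Pre_organize_topi; infer_instance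
def pvWitness_organize_topi : List Int × Int × Int × Int := ([1, 2, 3, 4, 5, 6, 7, 8], 2, 2, 1)

def Spec_organize_topi (array : List Int) (nr_idcs : Int) (nr_domains : Int) (length : Int) (out : List (List (List Int))) : Prop := out = organize_topi_alt array nr_idcs nr_domains length
instance (array : List Int) (nr_idcs : Int) (nr_domains : Int) (length : Int) (out : List (List (List Int))) : Decidable (Spec_organize_topi array nr_idcs nr_domains length out) := by unfold Spec_organize_topi; infer_instance

-- ===== CLAIM (what is proved, stated in full; the proofs are below) =====
def Claim_equal_organize_topi : Prop := ∀ (array : List Int) (nr_idcs : Int) (nr_domains : Int) (length : Int), Dom_organize_topi array nr_idcs nr_domains length → Pre_organize_topi array nr_idcs nr_domains length → Spec_organize_topi array nr_idcs nr_domains length (organize_topi array nr_idcs nr_domains length)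

-- ===== LEMMAS AND PROOFS =====

-- A's inner loop: folding the running index and appending slices equals a range-indexed map.
theorem ot_inner_fold (array : List Int) (length : Int) (L : List Int) (idx : Int)
    (acc : List (List Int)) :
    L.foldl
      (fun (st2 : Int × List (List Int)) (_j : Int) =>
        (st2.1 + length + 1,
         st2.2 ++ [PySem.List.slice array (some st2.1) (some (st2.1 + length))]))
      (idx, acc)
    = (idx + L.length * (length + 1),
       acc ++ (List.range L.length).map (fun (j : Nat) =>
         PySem.List.slice array (some (idx + (j : Int) * (length + 1)))
           (some (idx + (j : Int) * (length + 1) + length)))) := by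
  induction L using List.reverseRecOn with
  | nil => simp
  | append_singleton xs x ih =>
      rw [List.foldl_append, ih]
      simp only [List.foldl_cons, List.foldl_nil, List.length_append, List.length_cons,
        List.length_nil, Nat.zero_add]
      rw [List.range_succ, List.map_append, List.map_singleton, ← List.append_assoc,
        Prod.mk.injEq]
      refine ⟨by push_cast; ring, ?_⟩
      rfl

-- A's outer loop after N iterations: state is the closed form.
theorem ot_outer_fold (array : List Int) (nr_domains : Int) (length : Int) (N : Nat) :
    (((List.range N).map (fun (k : Nat) => (k : Int))).foldl
      (fun (st : Int × List (List (List Int))) (_i : Int) =>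
        let inner :=
          (PySem.List.pyRange 0 nr_domains 1).foldl
            (fun (st2 : Int × List (List Int)) (_j : Int) =>
              (st2.1 + length + 1,
               st2.2 ++ [PySem.List.slice array (some st2.1) (some (st2.1 + length))]))
            (st.1, [])
        (inner.1, st.2 ++ [inner.2.reverse]))
      ((0 : Int), ([] : List (List (List Int)))))
    = ((N : Int) * (PySem.List.pyRange 0 nr_domains 1).length * (length + 1),
       (List.range N).map (fun (i : Nat) =>
         ((List.range (PySem.List.pyRange 0 nr_domains 1).length).map (fun (j : Nat) =>
           PySem.List.slice array
             (some (((i : Int) * (PySem.List.pyRange 0 nr_domains 1).length + (j : Int)) * (length + 1)))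
             (some (((i : Int) * (PySem.List.pyRange 0 nr_domains 1).length + (j : Int)) * (length + 1) + length)))).reverse)) := by
  induction N with
  | zero => simp
  | succ N ih =>
      rw [List.range_succ]
      simp only [List.map_append, List.map_singleton, List.foldl_append, List.foldl_cons,
        List.foldl_nil]
      rw [ih]
      dsimp only
      rw [ot_inner_fold]
      simp only [List.nil_append]
      rw [Prod.mk.injEq]
      refine ⟨by push_cast; ring, ?_⟩
      congr 3
      apply List.map_congr_left
      intro j _
      rw [show (N : Int) * ((PySem.List.pyRange 0 nr_domains 1).length : Int) * (length + 1) +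
            (j : Int) * (length + 1)
          = ((N : Int) * ((PySem.List.pyRange 0 nr_domains 1).length : Int) + (j : Int)) *
            (length + 1) from by ring]

-- pyRange 0 b 1 is the natural range, cast.
theorem ot_pyRange_zero (b : Int) :
    PySem.List.pyRange 0 b 1 = (List.range b.toNat).map (fun (k : Nat) => (k : Int)) := by
  rw [PySem.List.pyRange_one]
  simp only [Int.sub_zero]
  exact List.map_congr_left (fun a _ => by simp)

-- B's divide-and-conquer rows in closed form: slices at start + j*(length+1), reversed.
theorem otB_rows_eq (array : List Int) (length : Int) :
    ∀ (K : Nat) (start : Int) (k : Int), k.toNat = K →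
    otB_rows array length start k
      = (((List.range K).map (fun (j : Nat) =>
            PySem.List.slice array (some (start + (j : Int) * (length + 1)))
              (some (start + (j : Int) * (length + 1) + length)))).reverse,
         start + (K : Int) * (length + 1)) := by
  intro K
  induction K using Nat.strong_induction_on with
  | _ K ih =>
    intro start k hk
    rw [otB_rows]
    by_cases h0 : k ≤ 0
    · rw [if_pos h0]
      have hK0 : K = 0 := by omega
      subst hK0
      simp
    · rw [if_neg h0]
      by_cases h1 : k = 1
      · rw [if_pos h1]
        have hK1 : K = 1 := by omega
        subst hK1
        simp
        omega
      · rw [if_neg h1]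
        dsimp only
        have hfd : PySem.Int.floordiv k 2 = k / 2 :=
          PySem.Int.floordiv_eq_ediv_of_pos (by omega)
        have hh1 : 1 ≤ PySem.Int.floordiv k 2 := by omega
        have hh2 : PySem.Int.floordiv k 2 ≤ k - 1 := by omega
        rw [ih (PySem.Int.floordiv k 2).toNat (by omega) start (PySem.Int.floordiv k 2) rfl]
        dsimp only
        rw [ih (k - PySem.Int.floordiv k 2).toNat (by omega)
            (start + ((PySem.Int.floordiv k 2).toNat : Int) * (length + 1))
            (k - PySem.Int.floordiv k 2) rfl]
        dsimp only
        rw [Prod.mk.injEq]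
        constructor
        · rw [← List.reverse_append]
          congr 1
          rw [show K = (PySem.Int.floordiv k 2).toNat + (k - PySem.Int.floordiv k 2).toNat
              from by omega]
          rw [List.range_add, List.map_append]
          congr 1
          rw [List.map_map]
          apply List.map_congr_left
          intro j _
          simp only [Function.comp_apply]
          congr 2 <;> push_cast <;> ring
        · have : ((K : Int)) = ((PySem.Int.floordiv k 2).toNat : Int)
              + ((k - PySem.Int.floordiv k 2).toNat : Int) := by omega
          rw [this]
          ring

-- B's divide-and-conquer blocks in closed form.
theorem otB_blocks_eq (array : List Int) (length nr_domains : Int) :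
    ∀ (N : Nat) (start : Int) (n : Int), n.toNat = N →
    otB_blocks array length nr_domains start n
      = (((List.range N).map (fun (i : Nat) =>
           ((List.range nr_domains.toNat).map (fun (j : Nat) =>
             PySem.List.slice array
               (some (start + ((i : Int) * nr_domains.toNat + (j : Int)) * (length + 1)))
               (some (start + ((i : Int) * nr_domains.toNat + (j : Int)) * (length + 1)
                 + length)))).reverse)).reverse,
         start + (N : Int) * nr_domains.toNat * (length + 1)) := by
  intro N
  induction N using Nat.strong_induction_on with
  | _ N ih =>
    intro start n hn
    rw [otB_blocks]
    by_cases h0 : n ≤ 0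
    · rw [if_pos h0]
      have hN0 : N = 0 := by omega
      subst hN0
      simp
    · rw [if_neg h0]
      by_cases h1 : n = 1
      · rw [if_pos h1]
        have hN1 : N = 1 := by omega
        subst hN1
        rw [otB_rows_eq array length nr_domains.toNat start nr_domains rfl]
        dsimp only
        rw [Prod.mk.injEq]
        constructor
        · simp only [List.range_one, List.map_singleton, List.reverse_singleton,
            Nat.cast_zero, zero_mul, zero_add]
        · push_cast
          ring
      · rw [if_neg h1]
        dsimp only
        have hfd : PySem.Int.floordiv n 2 = n / 2 :=
          PySem.Int.floordiv_eq_ediv_of_pos (by omega)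
        have hh1 : 1 ≤ PySem.Int.floordiv n 2 := by omega
        have hh2 : PySem.Int.floordiv n 2 ≤ n - 1 := by omega
        rw [ih (PySem.Int.floordiv n 2).toNat (by omega) start (PySem.Int.floordiv n 2) rfl]
        dsimp only
        rw [ih (n - PySem.Int.floordiv n 2).toNat (by omega)
            (start + ((PySem.Int.floordiv n 2).toNat : Int) * nr_domains.toNat * (length + 1))
            (n - PySem.Int.floordiv n 2) rfl]
        dsimp only
        rw [Prod.mk.injEq]
        constructor
        · rw [← List.reverse_append]
          congr 1
          rw [show N = (PySem.Int.floordiv n 2).toNat + (n - PySem.Int.floordiv n 2).toNat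
              from by omega]
          rw [List.range_add, List.map_append]
          congr 1
          rw [List.map_map]
          apply List.map_congr_left
          intro i _
          simp only [Function.comp_apply]
          congr 1
          apply List.map_congr_left
          intro j _
          congr 2 <;> push_cast <;> ring
        · have : ((N : Int)) = ((PySem.Int.floordiv n 2).toNat : Int)
              + ((n - PySem.Int.floordiv n 2).toNat : Int) := by omega
          rw [this]
          ring

-- ===== VERDICT (by name: the statement is the Claim_ definition above) =====
theorem organize_topi_spec : Claim_equal_organize_topi := by
  intro array nr_idcs nr_domains length _hdom _hpre
  unfold Spec_organize_topi organize_topi organize_topi_alt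
  dsimp only
  rw [ot_pyRange_zero nr_idcs, ot_outer_fold]
  rw [otB_blocks_eq array length nr_domains nr_idcs.toNat 0 nr_idcs rfl]
  dsimp only
  have hK : (PySem.List.pyRange 0 nr_domains 1).length = nr_domains.toNat := by
    rw [ot_pyRange_zero]
    simp
  rw [hK]
  congr 1
  apply List.map_congr_left
  intro i _
  congr 1
  apply List.map_congr_left
  intro j hj
  congr 2 <;> push_cast <;> ring
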